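-- pv_equiv track=rewrite | github.com/Jseca666/gri | gri/master/separate.py | _boundary_cross
-- ===== SOURCE A (Python) =====
-- from typing import List, Dict, Tuple, Set
--
-- def _boundary_cross(route: List[int], S: Set[int], depot: int) -> int:
--     # 统计 δ⁺(S)：从 S 出到 S̄ 的弧次数（视路线为 depot->...->depot）
--     prev = depot; c = 0
--     for v in route:
--         if (prev in S) and (v not in S):
--             c += 1
--         prev = v
--     if (prev in S) and (depot not in S):
--         c += 1
--     return c
-- ===== SOURCE B (Python) =====
-- from typing import List, Set
-- from itertools import groupby
--
-- def _boundary_cross(route: List[int], S: Set[int], depot: int) -> int: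
--     # Membership profile of the closed walk depot -> route -> depot.
--     bits = [depot in S] + [v in S for v in route] + [depot in S]
--     # Each maximal run of True's exits S exactly once -- except a run that
--     # reaches the end of the walk, which has no outgoing arc.
--     blocks = sum(1 for key, _ in groupby(bits) if key)
--     return blocks - 1 if bits[-1] else blocks
-- ===== Notes on version B (the rewrite author's own statement) =====
-- stated objective: alternative
-- what changed: B computes the S-membership bit profile of the closed walk and counts maximal runs of in-S vertices with itertools.groupby, subtracting one when the walk ends inside S, instead of A's prev-accumulator transition loop with a separate wrap-around branch.
import Mathlib
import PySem

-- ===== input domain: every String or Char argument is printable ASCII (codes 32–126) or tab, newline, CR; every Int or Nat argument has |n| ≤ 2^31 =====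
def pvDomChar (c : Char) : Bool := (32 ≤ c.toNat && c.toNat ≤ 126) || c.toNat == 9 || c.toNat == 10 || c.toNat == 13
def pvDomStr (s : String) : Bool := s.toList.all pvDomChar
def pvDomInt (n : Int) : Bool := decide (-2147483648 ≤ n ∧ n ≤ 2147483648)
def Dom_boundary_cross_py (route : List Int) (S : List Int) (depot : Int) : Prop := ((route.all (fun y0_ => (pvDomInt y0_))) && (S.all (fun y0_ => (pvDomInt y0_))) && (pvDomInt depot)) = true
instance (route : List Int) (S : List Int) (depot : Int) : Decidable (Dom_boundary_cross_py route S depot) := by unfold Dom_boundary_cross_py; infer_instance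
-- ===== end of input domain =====

-- B maps the closed walk to its S-membership bit profile and counts maximal True-runs
-- (groupby), subtracting one if the walk ends inside S; a different decomposition (simpler).


-- ===== PORT A =====
-- literal port of A: prev/c accumulator loop, then the closing-edge branch
def boundary_cross_py (route : List Int) (S : List Int) (depot : Int) : Int :=
  let st := route.foldl
    (fun (st : Int × Int) v =>
      (v, if S.contains st.1 && !(S.contains v) then st.2 + 1 else st.2))
    (depot, 0)
  if S.contains st.1 && !(S.contains depot) then st.2 + 1 else st.2

-- ===== PORT B =====
-- groupby on a Bool list: number of maximal runs whose key is true
-- (recursion carries the key of the current run, as groupby does)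
def pvTrueBlocks : List Bool → Option Bool → Int
  | [], _ => 0
  | b :: rest, prev =>
    (if b && prev ≠ some true then 1 else 0) + pvTrueBlocks rest (some b)

-- port of B: membership bit profile of the closed walk, count True-runs,
-- minus one if the profile ends True (bits[-1]; bits is never empty)
def boundary_cross_py_alt (route : List Int) (S : List Int) (depot : Int) : Int :=
  let bits := S.contains depot :: (route.map (fun v => S.contains v) ++ [S.contains depot])
  let blocks := pvTrueBlocks bits none
  if bits.getLastD false then blocks - 1 else blocks

-- ===== PRECONDITION & SPEC =====
def Spec_boundary_cross_py (route : List Int) (S : List Int) (depot : Int) (out : Int) : Prop := out = boundary_cross_py_alt route S depot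
instance (route : List Int) (S : List Int) (depot : Int) (out : Int) : Decidable (Spec_boundary_cross_py route S depot out) := by unfold Spec_boundary_cross_py; infer_instance

-- ===== CLAIM (what is proved, stated in full; the proofs are below) =====
def Claim_equal_boundary_cross_py : Prop := ∀ (route : List Int) (S : List Int) (depot : Int), Dom_boundary_cross_py route S depot → Spec_boundary_cross_py route S depot (boundary_cross_py route S depot)

-- ===== LEMMAS AND PROOFS =====

-- proof-only helper: number of True→False descents along prev :: l
def pvDowns : Bool → List Bool → Int
  | _, [] => 0
  | p, b :: rest => (if p && !b then 1 else 0) + pvDowns b rest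

-- A's fold + closing branch counts the descents of the membership profile
theorem bcA_eq_downs (S : List Int) (depot : Int) :
    ∀ (route : List Int) (prev c : Int),
      (let st := route.foldl
        (fun (st : Int × Int) v =>
          (v, if S.contains st.1 && !(S.contains v) then st.2 + 1 else st.2))
        (prev, c)
       if S.contains st.1 && !(S.contains depot) then st.2 + 1 else st.2)
      = c + pvDowns (S.contains prev) (route.map (fun v => S.contains v) ++ [S.contains depot]) := by
  intro route
  induction route with
  | nil =>
    intro prev c
    simp only [List.map_nil, List.nil_append, List.foldl_nil, pvDowns]
    split <;> simp
  | cons v rest ih =>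
    intro prev c
    simp only [List.foldl_cons, List.map_cons, List.cons_append, pvDowns]
    rw [ih]
    split <;> simp <;> omega

-- ascent/descent balance: True-run starts = descents + (last bit) - (initial bit)
theorem blocks_eq_downs :
    ∀ (l : List Bool) (p : Bool),
      pvTrueBlocks l (some p)
        = pvDowns p l + (if l.getLastD p then 1 else 0) - (if p then 1 else 0) := by
  intro l
  induction l with
  | nil => intro p; simp [pvTrueBlocks, pvDowns]
  | cons b rest ih =>
    intro p
    simp only [pvTrueBlocks, pvDowns, List.getLastD_cons]
    rw [ih b]
    cases p <;> cases b <;> simp <;> omega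

-- ===== VERDICT (by name: the statement is the Claim_ definition above) =====
theorem boundary_cross_py_spec : Claim_equal_boundary_cross_py := by
  intro route S depot _
  show boundary_cross_py route S depot = boundary_cross_py_alt route S depot
  unfold boundary_cross_py boundary_cross_py_alt
  have hlast : ((route.map (fun v => S.contains v)) ++ [S.contains depot]).getLastD (S.contains depot) = S.contains depot := List.getLastD_concat
  have hlast2 : (S.contains depot :: ((route.map (fun v => S.contains v)) ++ [S.contains depot])).getLastD false = S.contains depot := by
    rw [show (S.contains depot :: ((route.map (fun v => S.contains v)) ++ [S.contains depot])) = ((S.contains depot :: route.map (fun v => S.contains v)) ++ [S.contains depot]) by simp]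
    exact List.getLastD_concat
  rw [bcA_eq_downs S depot route depot 0]
  simp only [pvTrueBlocks, blocks_eq_downs, hlast, hlast2]
  cases h : S.contains depot <;> simp [h]
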